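-- pv_equiv track=rewrite | github.com/paulklemstine/factor | b3_millennium.py | tunnell_count
-- ===== SOURCE A (Python) =====
-- import math
--
-- def tunnell_count(d):
--     """Count representations for Tunnell's theorem."""
--     if d % 2 == 1:  # odd
--         n1 = 0  # #{2x²+y²+8z²=d}
--         n2 = 0  # #{2x²+y²+32z²=d}
--         lim = int(math.isqrt(d)) + 1
--         for x in range(-lim, lim + 1):
--             for y in range(-lim, lim + 1):
--                 rem = d - 2*x*x - y*y
--                 if rem >= 0 and rem % 8 == 0:
--                     z2 = rem // 8
--                     z = int(math.isqrt(z2))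
--                     if z * z == z2:
--                         n1 += 2 if z > 0 else 1
--                 if rem >= 0 and rem % 32 == 0:
--                     z2 = rem // 32
--                     z = int(math.isqrt(z2))
--                     if z * z == z2:
--                         n2 += 2 if z > 0 else 1
--         return n1, n2
--     else:  # even
--         d2 = d // 2
--         n1 = 0
--         n2 = 0
--         lim = int(math.isqrt(d2)) + 1
--         for x in range(-lim, lim + 1):
--             for y in range(-lim, lim + 1):
--                 rem = d2 - 4*x*x - y*y
--                 if rem >= 0 and rem % 8 == 0:
--                     z2 = rem // 8
--                     z = int(math.isqrt(z2))
--                     if z * z == z2: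
--                         n1 += 2 if z > 0 else 1
--                 if rem >= 0 and rem % 32 == 0:
--                     z2 = rem // 32
--                     z = int(math.isqrt(z2))
--                     if z * z == z2:
--                         n2 += 2 if z > 0 else 1
--         return n1, n2
-- ===== SOURCE B (Python) =====
-- import math
--
-- def _count_yz(M, c):
--     """Number of integer pairs (y, z) with y*y + c*z*z == M (M may be negative -> 0)."""
--     if M < 0:
--         return 0
--     total = 0
--     zlim = math.isqrt(M // c)
--     for z in range(-zlim, zlim + 1):
--         rem = M - c * z * z
--         r = math.isqrt(rem)
--         if r * r == rem:
--             total += 2 if r > 0 else 1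
--     return total
--
-- def tunnell_count(d):
--     """Count representations for Tunnell's theorem."""
--     if d % 2 == 1:
--         xlim = math.isqrt(d // 2)
--         n1 = sum(_count_yz(d - 2*x*x, 8) for x in range(-xlim, xlim + 1))
--         n2 = sum(_count_yz(d - 2*x*x, 32) for x in range(-xlim, xlim + 1))
--     else:
--         d2 = d // 2
--         xlim = math.isqrt(d2 // 4)
--         n1 = sum(_count_yz(d2 - 4*x*x, 8) for x in range(-xlim, xlim + 1))
--         n2 = sum(_count_yz(d2 - 4*x*x, 32) for x in range(-xlim, xlim + 1))
--     return n1, n2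
-- ===== Notes on version B (the rewrite author's own statement) =====
-- stated objective: faster
-- what changed: A's single fused (x,y) double loop over the full [-isqrt(d)-1, isqrt(d)+1] square (solving for z inside) is replaced by two independent passes over the tight x range [-isqrt(D/a), isqrt(D/a)] that delegate to a binary-form helper counting (y,z) solutions of y^2 + c*z^2 = M by looping z over its tight range and square-testing the remainder for y.
import Mathlib
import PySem

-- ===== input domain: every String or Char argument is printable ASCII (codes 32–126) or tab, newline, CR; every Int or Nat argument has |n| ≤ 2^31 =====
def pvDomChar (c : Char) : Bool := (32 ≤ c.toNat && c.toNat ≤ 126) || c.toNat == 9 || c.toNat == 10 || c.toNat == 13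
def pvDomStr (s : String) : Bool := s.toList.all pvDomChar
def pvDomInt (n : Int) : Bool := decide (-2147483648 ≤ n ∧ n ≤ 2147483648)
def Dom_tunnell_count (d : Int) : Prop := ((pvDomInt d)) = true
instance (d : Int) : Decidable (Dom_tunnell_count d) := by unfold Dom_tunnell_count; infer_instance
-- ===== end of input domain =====

-- B replaces A's fused (x,y)-double-loop-solve-z with an outer x pass over the tight x range that
-- delegates to a binary-form helper counting (y,z) solutions by looping z and square-testing y²;
-- a timing run measured B faster by a constant factor.

-- math.isqrt, exact for 0 ≤ n (Python raises ValueError for n < 0; such inputs are outside Pre_)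
def pyIsqrt (n : Int) : Int := ((Int.toNat n).sqrt : Int)

-- ===== PORT A =====
def tunnell_count (d : Int) : Int × Int :=
  if PySem.Int.mod d 2 = 1 then
    let lim : Int := pyIsqrt d + 1
    (PySem.List.pyRange (-lim) (lim + 1) 1).foldl (fun acc x =>
      (PySem.List.pyRange (-lim) (lim + 1) 1).foldl (fun acc y =>
        let rem := d - 2*x*x - y*y
        let acc :=
          if 0 ≤ rem ∧ PySem.Int.mod rem 8 = 0 then
            let z2 := PySem.Int.floordiv rem 8
            let z := pyIsqrt z2
            if z * z = z2 then (acc.1 + (if 0 < z then 2 else 1), acc.2) else acc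
          else acc
        if 0 ≤ rem ∧ PySem.Int.mod rem 32 = 0 then
          let z2 := PySem.Int.floordiv rem 32
          let z := pyIsqrt z2
          if z * z = z2 then (acc.1, acc.2 + (if 0 < z then 2 else 1)) else acc
        else acc) acc) (0, 0)
  else
    let d2 := PySem.Int.floordiv d 2
    let lim : Int := pyIsqrt d2 + 1
    (PySem.List.pyRange (-lim) (lim + 1) 1).foldl (fun acc x =>
      (PySem.List.pyRange (-lim) (lim + 1) 1).foldl (fun acc y =>
        let rem := d2 - 4*x*x - y*y
        let acc :=
          if 0 ≤ rem ∧ PySem.Int.mod rem 8 = 0 then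
            let z2 := PySem.Int.floordiv rem 8
            let z := pyIsqrt z2
            if z * z = z2 then (acc.1 + (if 0 < z then 2 else 1), acc.2) else acc
          else acc
        if 0 ≤ rem ∧ PySem.Int.mod rem 32 = 0 then
          let z2 := PySem.Int.floordiv rem 32
          let z := pyIsqrt z2
          if z * z = z2 then (acc.1, acc.2 + (if 0 < z then 2 else 1)) else acc
        else acc) acc) (0, 0)

-- ===== PORT B =====
-- number of integer pairs (y, z) with y*y + c*z*z = M
def countYZ (M c : Int) : Int :=
  if M < 0 then 0
  else
    let zlim := pyIsqrt (PySem.Int.floordiv M c)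
    (PySem.List.pyRange (-zlim) (zlim + 1) 1).foldl (fun total z =>
      let rem := M - c*z*z
      let r := pyIsqrt rem
      if r * r = rem then total + (if 0 < r then 2 else 1) else total) 0

def tunnell_count_alt (d : Int) : Int × Int :=
  if PySem.Int.mod d 2 = 1 then
    let xlim := pyIsqrt (PySem.Int.floordiv d 2)
    let xs := PySem.List.pyRange (-xlim) (xlim + 1) 1
    ((xs.map (fun x => countYZ (d - 2*x*x) 8)).sum,
     (xs.map (fun x => countYZ (d - 2*x*x) 32)).sum)
  else
    let d2 := PySem.Int.floordiv d 2
    let xlim := pyIsqrt (PySem.Int.floordiv d2 4)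
    let xs := PySem.List.pyRange (-xlim) (xlim + 1) 1
    ((xs.map (fun x => countYZ (d2 - 4*x*x) 8)).sum,
     (xs.map (fun x => countYZ (d2 - 4*x*x) 32)).sum)

-- ===== PRECONDITION & SPEC =====
-- math.isqrt raises ValueError for negative arguments, so A raises on every d < 0.
def Pre_tunnell_count (d : Int) : Prop := 0 ≤ d
instance (d : Int) : Decidable (Pre_tunnell_count d) := by unfold Pre_tunnell_count; infer_instance
def pvWitness_tunnell_count : Int := (34)

def Spec_tunnell_count (d : Int) (out : Int × Int) : Prop := out = tunnell_count_alt d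
instance (d : Int) (out : Int × Int) : Decidable (Spec_tunnell_count d out) := by unfold Spec_tunnell_count; infer_instance

-- ===== CLAIM =====
def Claim_equal_tunnell_count : Prop := ∀ (d : Int), Dom_tunnell_count d → Pre_tunnell_count d → Spec_tunnell_count d (tunnell_count d)

-- ===== LEMMAS AND PROOFS =====

-- value added to the second component of A's inner-loop accumulator (and, with the 0 ≤ r guard
-- dropped, the value B's z-loop body adds: for r < 0, pyIsqrt r = 0 ≠ r so cntY r = 0 anyway)
def cntY (r : Int) : Int :=
  if pyIsqrt r * pyIsqrt r = r then (if 0 < pyIsqrt r then 2 else 1) else 0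

-- value added to a component of A's inner-loop accumulator for remainder r and divisor c
def cntZ (c r : Int) : Int :=
  if 0 ≤ r ∧ PySem.Int.mod r c = 0 then cntY (PySem.Int.floordiv r c) else 0

lemma pyIsqrt_nonneg (n : Int) : 0 ≤ pyIsqrt n := by
  simp [pyIsqrt]

lemma pyIsqrt_mul_self (z : Int) : pyIsqrt (z * z) = z.natAbs := by
  have h1 : z * z = ((z.natAbs * z.natAbs : ℕ) : ℤ) := by
    push_cast
    exact (abs_mul_abs_self z).symm
  have h : (z * z).toNat = z.natAbs * z.natAbs := by omega
  simp [pyIsqrt, h]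

lemma pyIsqrt_le_pyIsqrt {m n : Int} (h : m ≤ n) : pyIsqrt m ≤ pyIsqrt n := by
  simp only [pyIsqrt, Int.ofNat_le]
  exact Nat.sqrt_le_sqrt (by omega)

lemma lt_pyIsqrt_succ_sq (n : Int) (hn : 0 ≤ n) : n < (pyIsqrt n + 1) * (pyIsqrt n + 1) := by
  have h := Nat.lt_succ_sqrt' n.toNat
  have h2 : n.toNat < (n.toNat.sqrt + 1) * (n.toNat.sqrt + 1) := by
    calc n.toNat < n.toNat.sqrt.succ ^ 2 := h
      _ = (n.toNat.sqrt + 1) * (n.toNat.sqrt + 1) := by rw [Nat.succ_eq_add_one]; ring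
  simp only [pyIsqrt]
  exact lt_of_le_of_lt (by omega : n ≤ (n.toNat : ℤ)) (by exact_mod_cast h2)

-- core counting lemma: cntY m is the number of y in [-N, N] with y*y = m, for N covering all roots
lemma cntY_eq_sum (m : Int) (N : ℕ) (hN : ∀ y : ℤ, y * y = m → y.natAbs ≤ N) :
    cntY m = ∑ y ∈ Finset.Icc (-(N:ℤ)) (N:ℤ), (if y * y = m then (1:ℤ) else 0) := by
  rw [Finset.sum_boole]
  simp only [cntY]
  by_cases h : pyIsqrt m * pyIsqrt m = m
  · rw [if_pos h]
    have hs0 : 0 ≤ pyIsqrt m := pyIsqrt_nonneg m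
    set s := pyIsqrt m with hs
    have hroot : ∀ y : ℤ, y * y = m ↔ y = s ∨ y = -s := by
      intro y
      constructor
      · intro hy
        have hys : y * y = s * s := by rw [hy, h]
        exact mul_self_eq_mul_self_iff.mp hys
      · rintro (rfl | rfl) <;> [exact h; (rw [neg_mul_neg]; exact h)]
    have hsN : s.natAbs ≤ N := hN s h
    have hfil : Finset.filter (fun y => y * y = m) (Finset.Icc (-(N:ℤ)) (N:ℤ)) = {s, -s} := by
      apply Finset.ext
      intro y
      simp only [Finset.mem_filter, Finset.mem_insert, Finset.mem_singleton, Finset.mem_Icc]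
      constructor
      · rintro ⟨_, hy⟩; exact (hroot y).mp hy
      · rintro (rfl | rfl) <;> refine ⟨by omega, (hroot _).mpr (by tauto)⟩
    rw [hfil]
    by_cases hpos : 0 < s
    · have hne : s ∉ ({-s} : Finset ℤ) := by simp; omega
      rw [if_pos hpos, Finset.card_insert_of_notMem hne, Finset.card_singleton]
      norm_num
    · have hz : s = 0 := by omega
      rw [if_neg hpos, hz]
      norm_num
  · rw [if_neg h]
    have hfil : Finset.filter (fun y => y * y = m) (Finset.Icc (-(N:ℤ)) (N:ℤ)) = ∅ := by
      apply Finset.eq_empty_of_forall_notMem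
      intro y hy
      simp only [Finset.mem_filter] at hy
      apply h
      have hAbs : pyIsqrt m = (y.natAbs : ℤ) := by rw [← hy.2, pyIsqrt_mul_self]
      rw [hAbs, ← hy.2]
      push_cast
      exact abs_mul_abs_self y
    rw [hfil]
    simp

lemma cntZ_eq_sum (c r : Int) (hc : 0 < c) (N : ℕ)
    (hN : ∀ z : ℤ, c * (z * z) = r → z.natAbs ≤ N) :
    cntZ c r = ∑ z ∈ Finset.Icc (-(N:ℤ)) (N:ℤ), (if c * (z * z) = r then (1:ℤ) else 0) := by
  by_cases h : 0 ≤ r ∧ PySem.Int.mod r c = 0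
  · have hdvd : c ∣ r := (PySem.Int.mod_eq_zero_iff_dvd r c).mp h.2
    have hq : c * PySem.Int.floordiv r c = r := by
      rw [PySem.Int.floordiv_eq_ediv_of_pos hc]
      exact Int.mul_ediv_cancel' hdvd
    have : cntZ c r = cntY (PySem.Int.floordiv r c) := by simp [cntZ, h]
    rw [this, cntY_eq_sum _ N (fun z hz => hN z (by rw [← hq, hz]))]
    apply Finset.sum_congr rfl
    intro z _
    congr 1
    have hcne : c ≠ 0 := by omega
    simp only [eq_iff_iff]
    constructor
    · intro hz; rw [← hq, hz]
    · intro hz; exact mul_left_cancel₀ hcne (by rw [hq, hz])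
  · have : cntZ c r = 0 := by simp [cntZ, h]
    rw [this]
    symm
    apply Finset.sum_eq_zero
    intro z _
    rw [if_neg]
    intro hz
    apply h
    constructor
    · rw [← hz]; nlinarith [mul_self_nonneg z]
    · rw [PySem.Int.mod_eq_zero_iff_dvd]; exact ⟨z * z, hz.symm⟩

-- A's inner-loop body is a componentwise add of cntZ values
lemma A_body (d2 a x y : Int) (acc : Int × Int) :
    (let rem := d2 - a*x*x - y*y
     let acc :=
       if 0 ≤ rem ∧ PySem.Int.mod rem 8 = 0 then
         let z2 := PySem.Int.floordiv rem 8
         let z := pyIsqrt z2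
         if z * z = z2 then (acc.1 + (if 0 < z then 2 else 1), acc.2) else acc
       else acc
     if 0 ≤ rem ∧ PySem.Int.mod rem 32 = 0 then
       let z2 := PySem.Int.floordiv rem 32
       let z := pyIsqrt z2
       if z * z = z2 then (acc.1, acc.2 + (if 0 < z then 2 else 1)) else acc
     else acc)
    = (acc.1 + cntZ 8 (d2 - a*x*x - y*y), acc.2 + cntZ 32 (d2 - a*x*x - y*y)) := by
  simp only [cntZ, cntY]
  split_ifs <;> simp

-- a fold of componentwise adds is a pair of sums
lemma foldl_pair_add (f g : Int → Int) (l : List Int) (a b : Int) :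
    l.foldl (fun acc t => (acc.1 + f t, acc.2 + g t)) (a, b)
    = (a + (l.map f).sum, b + (l.map g).sum) := by
  induction l generalizing a b with
  | nil => simp
  | cons h t ih => simp [ih, add_assoc]

-- A's inner loop over y, as a pair of sums
lemma A_inner (d2 a x : Int) (l : List Int) (acc : Int × Int) :
    l.foldl (fun acc y =>
      let rem := d2 - a*x*x - y*y
      let acc :=
        if 0 ≤ rem ∧ PySem.Int.mod rem 8 = 0 then
          let z2 := PySem.Int.floordiv rem 8
          let z := pyIsqrt z2
          if z * z = z2 then (acc.1 + (if 0 < z then 2 else 1), acc.2) else acc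
        else acc
      if 0 ≤ rem ∧ PySem.Int.mod rem 32 = 0 then
        let z2 := PySem.Int.floordiv rem 32
        let z := pyIsqrt z2
        if z * z = z2 then (acc.1, acc.2 + (if 0 < z then 2 else 1)) else acc
      else acc) acc
    = (acc.1 + (l.map (fun y => cntZ 8 (d2 - a*x*x - y*y))).sum,
       acc.2 + (l.map (fun y => cntZ 32 (d2 - a*x*x - y*y))).sum) := by
  have : (fun (acc : Int × Int) y =>
      let rem := d2 - a*x*x - y*y
      let acc :=
        if 0 ≤ rem ∧ PySem.Int.mod rem 8 = 0 then
          let z2 := PySem.Int.floordiv rem 8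
          let z := pyIsqrt z2
          if z * z = z2 then (acc.1 + (if 0 < z then 2 else 1), acc.2) else acc
        else acc
      if 0 ≤ rem ∧ PySem.Int.mod rem 32 = 0 then
        let z2 := PySem.Int.floordiv rem 32
        let z := pyIsqrt z2
        if z * z = z2 then (acc.1, acc.2 + (if 0 < z then 2 else 1)) else acc
      else acc)
      = (fun acc y => (acc.1 + cntZ 8 (d2 - a*x*x - y*y), acc.2 + cntZ 32 (d2 - a*x*x - y*y))) := by
    funext acc y
    exact A_body d2 a x y acc
  rw [this, foldl_pair_add]

-- a pyRange sum over [-L, L] is a Finset.Icc sum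
lemma sum_pyRange_Icc (a b : Int) (hab : a ≤ b + 1) (f : Int → Int) :
    ((PySem.List.pyRange a (b + 1) 1).map f).sum = ∑ i ∈ Finset.Icc a b, f i := by
  obtain ⟨n, hn⟩ : ∃ n : ℕ, b + 1 = a + n := ⟨(b + 1 - a).toNat, by omega⟩
  induction n generalizing b with
  | zero =>
    have hb : b + 1 = a := by omega
    rw [hb, PySem.List.pyRange_one_eq_nil (le_refl a)]
    have : Finset.Icc a b = ∅ := Finset.Icc_eq_empty (by omega)
    simp [this]
  | succ k ih =>
    by_cases hk : k = 0
    · subst hk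
      have hb : b = a := by omega
      subst hb
      rw [PySem.List.pyRange_one_singleton]
      simp
    · have hab' : a ≤ b := by omega
      rw [PySem.List.pyRange_one_succ_right hab', List.map_append, List.sum_append]
      have hsum := ih (b - 1) (by omega) (by omega)
      simp only [sub_add_cancel] at hsum
      rw [hsum]
      have hins : Finset.Icc a b = insert b (Finset.Icc a (b - 1)) := by
        ext i
        simp only [Finset.mem_Icc, Finset.mem_insert]
        omega
      rw [hins, Finset.sum_insert (by simp only [Finset.mem_Icc]; omega)]
      simp
      ring

-- B's z-loop body adds cntY of the remainder
lemma B_body (M c z total : Int) :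
    (let rem := M - c*z*z
     let r := pyIsqrt rem
     if r * r = rem then total + (if 0 < r then 2 else 1) else total)
    = total + cntY (M - c*(z*z)) := by
  simp only [cntY, mul_assoc]
  split_ifs <;> simp

-- per-x identity: the y-sum of z-counts equals B's (y,z)-counting helper
lemma yz_sum (M c : Int) (hc : 0 < c) (L : ℕ)
    (hL : ∀ y : ℤ, y * y ≤ M → y.natAbs ≤ L) :
    ∑ y ∈ Finset.Icc (-(L:ℤ)) (L:ℤ), cntZ c (M - y*y) = countYZ M c := by
  by_cases hM : M < 0
  · rw [countYZ, if_pos hM]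
    apply Finset.sum_eq_zero
    intro y _
    rw [cntZ, if_neg]
    rintro ⟨h0, -⟩
    nlinarith [mul_self_nonneg y]
  · rw [not_lt] at hM
    -- rewrite B's helper as an Icc sum of cntY
    set q := PySem.Int.floordiv M c with hqdef
    have hq0 : 0 ≤ q := by
      rw [hqdef, PySem.Int.floordiv_eq_ediv_of_pos hc]
      exact Int.ediv_nonneg hM (by omega)
    set Z : ℕ := (pyIsqrt q).toNat with hZdef
    have hZ : pyIsqrt q = (Z:ℤ) := by
      rw [hZdef]; exact (Int.toNat_of_nonneg (pyIsqrt_nonneg q)).symm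
    have hB : countYZ M c = ∑ z ∈ Finset.Icc (-(Z:ℤ)) (Z:ℤ), cntY (M - c*(z*z)) := by
      rw [countYZ, if_neg (by omega)]
      have hbody : (fun (total : Int) z =>
          let rem := M - c*z*z
          let r := pyIsqrt rem
          if r * r = rem then total + (if 0 < r then 2 else 1) else total)
          = (fun total z => total + cntY (M - c*(z*z))) := by
        funext total z
        exact B_body M c z total
      rw [hbody, PySem.List.foldl_add, ← hqdef, hZ, zero_add]
      exact sum_pyRange_Icc _ _ (by omega) _
    rw [hB]
    -- every z with c*z*z = M - y*y satisfies |z| ≤ Z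
    have hcover : ∀ r : ℤ, r ≤ M → ∀ z : ℤ, c * (z * z) = r → z.natAbs ≤ Z := by
      intro r hr z hz
      have hzq : z * z ≤ q := by
        rw [hqdef, PySem.Int.le_floordiv_iff_mul_le hc]
        nlinarith
      have := pyIsqrt_le_pyIsqrt hzq
      rw [pyIsqrt_mul_self, hZ] at this
      exact_mod_cast this
    calc ∑ y ∈ Finset.Icc (-(L:ℤ)) (L:ℤ), cntZ c (M - y*y)
        = ∑ y ∈ Finset.Icc (-(L:ℤ)) (L:ℤ), ∑ z ∈ Finset.Icc (-(Z:ℤ)) (Z:ℤ),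
            (if c * (z * z) = M - y*y then (1:ℤ) else 0) := by
          apply Finset.sum_congr rfl
          intro y _
          exact cntZ_eq_sum c _ hc Z (hcover _ (by nlinarith [mul_self_nonneg y]))
      _ = ∑ z ∈ Finset.Icc (-(Z:ℤ)) (Z:ℤ), ∑ y ∈ Finset.Icc (-(L:ℤ)) (L:ℤ),
            (if y * y = M - c*(z*z) then (1:ℤ) else 0) := by
          rw [Finset.sum_comm]
          apply Finset.sum_congr rfl; intro z _
          apply Finset.sum_congr rfl; intro y _
          congr 1
          simp only [eq_iff_iff]
          constructor <;> (intro h'; linarith)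
      _ = ∑ z ∈ Finset.Icc (-(Z:ℤ)) (Z:ℤ), cntY (M - c*(z*z)) := by
          apply Finset.sum_congr rfl
          intro z _
          refine (cntY_eq_sum _ L ?_).symm
          intro y hy
          apply hL
          nlinarith [mul_self_nonneg z]

-- whole-branch identity: A's fused double loop equals B's x pass over the tight range
lemma branch_sum (D a c : Int) (_hD : 0 ≤ D) (ha : 0 < a) (hc : 0 < c) (L X : ℕ)
    (hXL : X ≤ L)
    (hX : ∀ x : ℤ, (X:ℤ) < x.natAbs → D - a*(x*x) < 0)
    (hL : ∀ y : ℤ, y * y ≤ D → y.natAbs ≤ L) :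
    ∑ x ∈ Finset.Icc (-(L:ℤ)) (L:ℤ), ∑ y ∈ Finset.Icc (-(L:ℤ)) (L:ℤ), cntZ c (D - a*x*x - y*y)
    = ∑ x ∈ Finset.Icc (-(X:ℤ)) (X:ℤ), countYZ (D - a*x*x) c := by
  have hper : ∀ x : ℤ, ∑ y ∈ Finset.Icc (-(L:ℤ)) (L:ℤ), cntZ c (D - a*x*x - y*y)
      = countYZ (D - a*x*x) c := by
    intro x
    have : ∀ y ∈ Finset.Icc (-(L:ℤ)) (L:ℤ), cntZ c (D - a*x*x - y*y) = cntZ c ((D - a*x*x) - y*y) := by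
      intro y _; ring_nf
    rw [Finset.sum_congr rfl this]
    apply yz_sum _ _ hc
    intro y hy
    apply hL
    nlinarith [mul_self_nonneg x]
  rw [Finset.sum_congr rfl (fun x _ => hper x)]
  symm
  apply Finset.sum_subset
  · apply Finset.Icc_subset_Icc <;> omega
  · intro x hx hx'
    simp only [Finset.mem_Icc] at hx hx'
    have hneg : D - a*(x*x) < 0 := hX x (by omega)
    rw [countYZ, if_pos (by nlinarith)]

-- A's whole fused double loop, as a pair of nested Icc-style list sums
lemma A_branch (D a : Int) (l : List Int) :
    l.foldl (fun acc x =>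
      l.foldl (fun acc y =>
        let rem := D - a*x*x - y*y
        let acc :=
          if 0 ≤ rem ∧ PySem.Int.mod rem 8 = 0 then
            let z2 := PySem.Int.floordiv rem 8
            let z := pyIsqrt z2
            if z * z = z2 then (acc.1 + (if 0 < z then 2 else 1), acc.2) else acc
          else acc
        if 0 ≤ rem ∧ PySem.Int.mod rem 32 = 0 then
          let z2 := PySem.Int.floordiv rem 32
          let z := pyIsqrt z2
          if z * z = z2 then (acc.1, acc.2 + (if 0 < z then 2 else 1)) else acc
        else acc) acc) ((0:Int), (0:Int))
    = ((l.map (fun x => (l.map (fun y => cntZ 8 (D - a*x*x - y*y))).sum)).sum,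
       (l.map (fun x => (l.map (fun y => cntZ 32 (D - a*x*x - y*y))).sum)).sum) := by
  have h : (fun (acc : Int × Int) x =>
      l.foldl (fun acc y =>
        let rem := D - a*x*x - y*y
        let acc :=
          if 0 ≤ rem ∧ PySem.Int.mod rem 8 = 0 then
            let z2 := PySem.Int.floordiv rem 8
            let z := pyIsqrt z2
            if z * z = z2 then (acc.1 + (if 0 < z then 2 else 1), acc.2) else acc
          else acc
        if 0 ≤ rem ∧ PySem.Int.mod rem 32 = 0 then
          let z2 := PySem.Int.floordiv rem 32
          let z := pyIsqrt z2
          if z * z = z2 then (acc.1, acc.2 + (if 0 < z then 2 else 1)) else acc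
        else acc) acc)
      = fun (acc : Int × Int) x =>
          (acc.1 + (l.map (fun y => cntZ 8 (D - a*x*x - y*y))).sum,
           acc.2 + (l.map (fun y => cntZ 32 (D - a*x*x - y*y))).sum) := by
    funext acc x
    exact A_inner D a x l acc
  rw [h, foldl_pair_add]
  simp

-- the x-tail bound: beyond the tight limit the quadratic part exceeds D
lemma x_tail (D a : Int) (ha : 0 < a) (hD : 0 ≤ D) (x : Int)
    (hx : ((PySem.Int.floordiv D a).toNat.sqrt : ℤ) < x.natAbs) : D - a*(x*x) < 0 := by
  set fd := PySem.Int.floordiv D a with hfd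
  have hfd0 : 0 ≤ fd := by
    rw [hfd, PySem.Int.floordiv_eq_ediv_of_pos ha]
    exact Int.ediv_nonneg hD (by omega)
  have hsq : fd < (pyIsqrt fd + 1) * (pyIsqrt fd + 1) := lt_pyIsqrt_succ_sq fd hfd0
  have hpy : pyIsqrt fd = (fd.toNat.sqrt : ℤ) := rfl
  have h1 : (fd.toNat.sqrt : ℤ) + 1 ≤ (x.natAbs : ℤ) := by omega
  have h2 : ((fd.toNat.sqrt : ℤ) + 1) * ((fd.toNat.sqrt : ℤ) + 1) ≤ x * x := by
    nlinarith [Int.natAbs_mul_self' x, Int.natCast_nonneg x.natAbs]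
  have h3 : fd < x * x := by rw [hpy] at hsq; linarith
  have h4 := PySem.Int.floordiv_mul_add_mod D a
  have h5 : PySem.Int.mod D a < a := PySem.Int.mod_lt D ha
  rw [← hfd] at h4
  nlinarith

-- the y-cover bound: any representable y fits in A's y range
lemma y_cover (D : Int) (L : ℕ) (hL : (D.toNat.sqrt : ℤ) + 1 ≤ (L:ℤ)) :
    ∀ y : ℤ, y * y ≤ D → y.natAbs ≤ L := by
  intro y hy
  have h1 := pyIsqrt_le_pyIsqrt hy
  rw [pyIsqrt_mul_self] at h1
  have h2 : pyIsqrt D = (D.toNat.sqrt : ℤ) := rfl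
  rw [h2] at h1
  omega

-- the two tight x limits are within A's x range
lemma xlim_le (D a : Int) (ha : 0 < a) (hD : 0 ≤ D) :
    (PySem.Int.floordiv D a).toNat.sqrt ≤ D.toNat.sqrt + 1 := by
  have h1 : PySem.Int.floordiv D a ≤ D := by
    rw [PySem.Int.floordiv_eq_ediv_of_pos ha]
    exact Int.ediv_le_self _ hD
  have h2 : (PySem.Int.floordiv D a).toNat ≤ D.toNat := by omega
  exact le_trans (Nat.sqrt_le_sqrt h2) (by omega)

-- one branch of the equivalence, for D = d (odd) or D = d // 2 (even) and quadratic coefficient a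
lemma branch_eq (D a : Int) (hD : 0 ≤ D) (ha : 0 < a) (c : Int) (hc : 0 < c) :
    ∑ x ∈ Finset.Icc (-((D.toNat.sqrt + 1 : ℕ):ℤ)) ((D.toNat.sqrt + 1 : ℕ):ℤ),
      ∑ y ∈ Finset.Icc (-((D.toNat.sqrt + 1 : ℕ):ℤ)) ((D.toNat.sqrt + 1 : ℕ):ℤ),
        cntZ c (D - a*x*x - y*y)
    = ∑ x ∈ Finset.Icc (-(((PySem.Int.floordiv D a).toNat.sqrt : ℕ):ℤ))
        (((PySem.Int.floordiv D a).toNat.sqrt : ℕ):ℤ), countYZ (D - a*x*x) c := by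
  apply branch_sum D a c hD ha hc
  · exact xlim_le D a ha hD
  · intro x hx
    exact x_tail D a ha hD x (by exact_mod_cast hx)
  · exact y_cover D _ (by push_cast; omega)

-- ===== VERDICT =====
theorem tunnell_count_spec : Claim_equal_tunnell_count := by
  intro d _ hd
  unfold Spec_tunnell_count
  have hd' : (0:ℤ) ≤ d := hd
  by_cases hodd : PySem.Int.mod d 2 = 1
  · simp only [tunnell_count, tunnell_count_alt, if_pos hodd]
    rw [A_branch]
    have hL : pyIsqrt d + 1 = ((d.toNat.sqrt + 1 : ℕ):ℤ) := by
      simp [pyIsqrt]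
    have hX : pyIsqrt (PySem.Int.floordiv d 2)
        = (((PySem.Int.floordiv d 2).toNat.sqrt : ℕ):ℤ) := rfl
    rw [hL, hX]
    simp only [sum_pyRange_Icc (-((d.toNat.sqrt + 1 : ℕ):ℤ)) ((d.toNat.sqrt + 1 : ℕ):ℤ)
        (by push_cast; omega),
      sum_pyRange_Icc (-(((PySem.Int.floordiv d 2).toNat.sqrt : ℕ):ℤ))
        (((PySem.Int.floordiv d 2).toNat.sqrt : ℕ):ℤ) (by omega)]
    rw [Prod.mk.injEq]
    exact ⟨branch_eq d 2 hd' (by norm_num) 8 (by norm_num),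
           branch_eq d 2 hd' (by norm_num) 32 (by norm_num)⟩
  · simp only [tunnell_count, tunnell_count_alt, if_neg hodd]
    have hD0 : (0:ℤ) ≤ PySem.Int.floordiv d 2 := by
      rw [PySem.Int.floordiv_eq_ediv_of_pos (by norm_num)]
      exact Int.ediv_nonneg hd' (by norm_num)
    rw [A_branch]
    have hL : pyIsqrt (PySem.Int.floordiv d 2) + 1
        = (((PySem.Int.floordiv d 2).toNat.sqrt + 1 : ℕ):ℤ) := by
      simp [pyIsqrt]
    have hX : pyIsqrt (PySem.Int.floordiv (PySem.Int.floordiv d 2) 4)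
        = (((PySem.Int.floordiv (PySem.Int.floordiv d 2) 4).toNat.sqrt : ℕ):ℤ) := rfl
    rw [hL, hX]
    simp only [sum_pyRange_Icc (-(((PySem.Int.floordiv d 2).toNat.sqrt + 1 : ℕ):ℤ))
        (((PySem.Int.floordiv d 2).toNat.sqrt + 1 : ℕ):ℤ) (by push_cast; omega),
      sum_pyRange_Icc (-(((PySem.Int.floordiv (PySem.Int.floordiv d 2) 4).toNat.sqrt : ℕ):ℤ))
        (((PySem.Int.floordiv (PySem.Int.floordiv d 2) 4).toNat.sqrt : ℕ):ℤ) (by omega)]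
    rw [Prod.mk.injEq]
    exact ⟨branch_eq (PySem.Int.floordiv d 2) 4 hD0 (by norm_num) 8 (by norm_num),
           branch_eq (PySem.Int.floordiv d 2) 4 hD0 (by norm_num) 32 (by norm_num)⟩
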